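-- pv_equiv track=rewrite | github.com/gabrielMalonso/fifa-world-cup-2026-calendar | src/fifa_world_cup_2026_calendar/pipeline.py | _localized_text
-- ===== SOURCE A (Python) =====
-- from typing import Any
--
-- def _localized_text(items: list[dict[str, Any]] | None) -> str | None:
--     if not items:
--         return None
--
--     for locale in ("pt-BR", "pt", "en-GB", "en"):
--         for item in items:
--             if item.get("Locale") == locale and item.get("Description"):
--                 return item["Description"]
--
--     for item in items:
--         description = item.get("Description")
--         if description:
--             return description
--     return None
-- ===== SOURCE B (Python) =====
-- from typing import Any
--
-- def _localized_text(items: list[dict[str, Any]] | None) -> str | None: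
--     if not items:
--         return None
--     by_locale: dict[Any, Any] = {}
--     fallback = None
--     for item in items:
--         desc = item.get("Description")
--         if not desc:
--             continue
--         loc = item.get("Locale")
--         if loc is not None and loc not in by_locale:
--             by_locale[loc] = desc
--         if fallback is None:
--             fallback = desc
--     for locale in ("pt-BR", "pt", "en-GB", "en"):
--         if locale in by_locale:
--             return by_locale[locale]
--     return fallback
-- ===== Notes on version B (the rewrite author's own statement) =====
-- stated objective: simpler
-- what changed: Replaces the per-locale rescans of the item list (plus a third fallback pass) by one pass that indexes the first non-empty Description per locale in a dict and records the first non-empty Description overall, then picks by locale priority.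
import Mathlib
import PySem

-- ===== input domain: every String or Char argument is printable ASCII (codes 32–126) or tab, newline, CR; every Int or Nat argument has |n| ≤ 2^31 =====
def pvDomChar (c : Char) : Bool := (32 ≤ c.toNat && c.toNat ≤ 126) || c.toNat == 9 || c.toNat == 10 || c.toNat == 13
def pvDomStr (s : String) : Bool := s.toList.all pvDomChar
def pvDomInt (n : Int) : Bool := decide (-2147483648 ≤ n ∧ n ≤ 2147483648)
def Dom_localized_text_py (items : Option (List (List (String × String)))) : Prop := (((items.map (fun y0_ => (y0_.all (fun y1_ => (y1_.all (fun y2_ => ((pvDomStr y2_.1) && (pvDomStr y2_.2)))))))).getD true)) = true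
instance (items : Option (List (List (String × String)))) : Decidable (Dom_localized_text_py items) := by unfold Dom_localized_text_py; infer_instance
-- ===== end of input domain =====

-- B replaces A's per-locale rescans (and a third fallback pass) by ONE pass building a
-- locale -> first non-empty Description dict plus a first-overall fallback; objective: simpler.

-- ===== PORT A =====
-- inner 'for item in items' of the locale loop: first item with Locale == locale and truthy Description
def aFindLocale (locale : String) : List (List (String × String)) → Option String
  | [] => none
  | item :: rest =>
    if item.lookup "Locale" = some locale ∧ (item.lookup "Description").getD "" ≠ "" then
      item.lookup "Description"
    else aFindLocale locale rest

-- outer 'for locale in (...)' loop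
def aLocalesLoop (its : List (List (String × String))) : List String → Option String
  | [] => none
  | l :: ls =>
    match aFindLocale l its with
    | some d => some d
    | none => aLocalesLoop its ls

-- final fallback loop
def aFallback : List (List (String × String)) → Option String
  | [] => none
  | item :: rest =>
    if (item.lookup "Description").getD "" ≠ "" then item.lookup "Description"
    else aFallback rest

def localized_text_py (items : Option (List (List (String × String)))) : Option String :=
  match items with
  | none => none
  | some its =>
    if its = [] then none
    else
      match aLocalesLoop its ["pt-BR", "pt", "en-GB", "en"] with
      | some d => some d
      | none => aFallback its

-- ===== PORT B =====
-- single indexing pass: (by_locale dict, fallback)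
def bIndex : List (List (String × String)) → PySem.Dict String String → Option String →
    PySem.Dict String String × Option String
  | [], d, fb => (d, fb)
  | item :: rest, d, fb =>
    match item.lookup "Description" with
    | none => bIndex rest d fb
    | some desc =>
      if desc = "" then bIndex rest d fb
      else
        let d' := match item.lookup "Locale" with
          | none => d
          | some loc => if d.contains loc then d else d.insert loc desc
        bIndex rest d' (if fb.isNone then some desc else fb)

-- priority pick over the built dict
def bPick (d : PySem.Dict String String) (fb : Option String) : List String → Option String
  | [] => fb
  | l :: ls =>
    match d.get? l with
    | some v => some v
    | none => bPick d fb ls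

def localized_text_py_alt (items : Option (List (List (String × String)))) : Option String :=
  match items with
  | none => none
  | some its =>
    if its = [] then none
    else
      let (d, fb) := bIndex its PySem.Dict.empty none
      bPick d fb ["pt-BR", "pt", "en-GB", "en"]

-- ===== PRECONDITION & SPEC =====
def Spec_localized_text_py (items : Option (List (List (String × String)))) (out : Option String) : Prop := out = localized_text_py_alt items
instance (items : Option (List (List (String × String)))) (out : Option String) : Decidable (Spec_localized_text_py items out) := by unfold Spec_localized_text_py; infer_instance

-- ===== CLAIM (what is proved, stated in full; the proofs are below) =====
def Claim_equal_localized_text_py : Prop := ∀ (items : Option (List (List (String × String)))), Dom_localized_text_py items → Spec_localized_text_py items (localized_text_py items)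

-- ===== LEMMAS AND PROOFS =====

-- the fallback component of the pass is the first non-empty Description (A's third loop)
theorem bIndex_snd (its : List (List (String × String))) :
    ∀ (d : PySem.Dict String String) (fb : Option String),
      (bIndex its d fb).2 = if fb.isNone then aFallback its else fb := by
  induction its with
  | nil => intro d fb; cases fb <;> simp [bIndex, aFallback]
  | cons item rest ih =>
    intro d fb
    simp only [bIndex, aFallback]
    cases h : item.lookup "Description" with
    | none => rw [ih]; cases fb <;> simp
    | some s =>
      dsimp only
      by_cases hs : s = ""
      · subst hs; rw [if_pos rfl, ih]; cases fb <;> simp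
      · rw [if_neg hs, ih]; cases fb <;> simp [hs]

-- lookups in the built dict agree with A's per-locale scan (first insertion wins)
theorem bIndex_fst_get? (its : List (List (String × String))) :
    ∀ (d : PySem.Dict String String) (fb : Option String) (l : String),
      ((bIndex its d fb).1).get? l =
        match d.get? l with
        | some v => some v
        | none => aFindLocale l its := by
  induction its with
  | nil =>
    intro d fb l
    simp only [bIndex, aFindLocale]
    cases d.get? l <;> rfl
  | cons item rest ih =>
    intro d fb l
    simp only [bIndex, aFindLocale]
    cases hdsc : item.lookup "Description" with
    | none =>
      rw [ih]
      simp
    | some s =>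
      dsimp only
      by_cases hs : s = ""
      · subst hs
        rw [if_pos rfl, ih]
        simp
      · rw [if_neg hs]
        cases hloc : item.lookup "Locale" with
        | none =>
          rw [ih]
          simp
        | some loc =>
          dsimp only
          by_cases hc : d.contains loc = true
          · -- already present: d unchanged; then l = loc means d.get? l is some
            rw [if_pos hc, ih]
            by_cases hl : l = loc
            · subst hl
              have hg : (d.get? l).isSome := by
                rw [← PySem.Dict.contains_eq_isSome_get?]; exact hc
              cases h : d.get? l with
              | none => rw [h] at hg; simp at hg
              | some v => simp
            · cases d.get? l with
              | some v => simp
              | none =>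
                rw [if_neg]
                rintro ⟨h1, -⟩
                exact hl (Option.some.injEq _ _ ▸ h1 : loc = l).symm
          · rw [if_neg hc, ih, PySem.Dict.get?_insert]
            by_cases hl : l = loc
            · subst hl
              have hg : d.get? l = none := by
                rw [PySem.Dict.get?_eq_none_iff_contains]
                simpa using hc
              simp [hg, hs]
            · rw [if_neg hl]
              cases d.get? l with
              | some v => simp
              | none =>
                rw [if_neg]
                rintro ⟨h1, -⟩
                exact hl (Option.some.injEq _ _ ▸ h1 : loc = l).symm

-- the pick loop equals A's locale loop followed by A's fallback loop
theorem bPick_eq (its : List (List (String × String))) (ls : List String) :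
    bPick (bIndex its PySem.Dict.empty none).1 (bIndex its PySem.Dict.empty none).2 ls =
      match aLocalesLoop its ls with
      | some d => some d
      | none => aFallback its := by
  induction ls with
  | nil =>
    simp [bPick, aLocalesLoop, bIndex_snd]
  | cons l ls ih =>
    simp only [bPick, aLocalesLoop]
    rw [bIndex_fst_get?]
    simp only [PySem.Dict.get?_empty]
    cases aFindLocale l its with
    | none => exact ih
    | some v => rfl

-- ===== VERDICT (by name: the statement is the Claim_ definition above) =====
theorem localized_text_py_spec : Claim_equal_localized_text_py := by
  intro items _
  unfold Spec_localized_text_py localized_text_py localized_text_py_alt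
  cases items with
  | none => rfl
  | some its =>
    by_cases h : its = []
    · simp [h]
    · simp only [if_neg h]
      rw [bPick_eq]
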